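-- pv_equiv track=rewrite | github.com/cubernetes/aoc2024 | 22/solution1.py | next_sn_n
-- ===== SOURCE A (Python) =====
-- def next_sn_n(s, n):
--     for _ in range(n):
--         s1 = s * 64
--         s = s ^ s1 % 2**24
--         s1 = s // 32
--         s = s ^ s1 % s**24
--         s1 = s * 2048
--         s = s ^ s1 % 2**24
--     return s
-- ===== SOURCE B (Python) =====
-- def _step(s):
--     s = s ^ (s * 64) % 2**24
--     s = s ^ (s // 32) % s**24
--     s = s ^ (s * 2048) % 2**24
--     return s
--
--
-- def next_sn_n(s, n):
--     # Memoised cycle detection: record every state with its index;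
--     # on the first repeat jump straight to index j + (n - j) % period.
--     seen = {}
--     seq = []
--     i = 0
--     while i < n:
--         if s in seen:
--             j = seen[s]
--             return seq[j + (n - j) % (i - j)]
--         seen[s] = i
--         seq.append(s)
--         s = _step(s)
--         i += 1
--     return s
-- ===== Notes on version B (the rewrite author's own statement) =====
-- stated objective: alternative
-- what changed: B replaces A's blind n-step loop by memoised cycle detection: it records each state's index in a dict, and on the first repeated state jumps directly to index j + (n - j) % period in the recorded sequence instead of iterating the remaining steps.
import Mathlib
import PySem

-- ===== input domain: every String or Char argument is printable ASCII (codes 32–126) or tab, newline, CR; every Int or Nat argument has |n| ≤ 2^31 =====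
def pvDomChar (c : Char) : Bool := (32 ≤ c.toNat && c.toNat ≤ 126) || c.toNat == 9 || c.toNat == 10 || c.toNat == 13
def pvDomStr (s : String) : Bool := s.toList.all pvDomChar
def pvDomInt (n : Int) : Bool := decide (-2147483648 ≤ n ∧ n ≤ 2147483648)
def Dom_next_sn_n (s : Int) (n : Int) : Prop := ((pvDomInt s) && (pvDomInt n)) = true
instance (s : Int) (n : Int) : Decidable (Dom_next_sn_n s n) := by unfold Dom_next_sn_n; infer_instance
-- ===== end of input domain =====

-- B replaces A's blind n-step iteration of the secret-number generator by memoised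
-- cycle detection (record each state's index; on the first repeat jump to
-- index j + (n - j) % period in the recorded sequence) — a structurally different, exact alternative.

-- ===== PORT A =====
-- literal transliteration of A: for _ in range(n), three xor/mod/floordiv steps on s
def next_sn_n (s : Int) (n : Int) : Int :=
  (PySem.List.pyRange 0 n).foldl (fun s _ =>
    let s1 := s * 64
    let s := PySem.Int.bxor s (PySem.Int.mod s1 (2 ^ 24))
    let s1 := PySem.Int.floordiv s 32
    let s := PySem.Int.bxor s (PySem.Int.mod s1 (s ^ 24))
    let s1 := s * 2048
    PySem.Int.bxor s (PySem.Int.mod s1 (2 ^ 24))) s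

-- ===== PORT B =====
-- Source B's _step helper
def pvStep (s : Int) : Int :=
  let s := PySem.Int.bxor s (PySem.Int.mod (s * 64) (2 ^ 24))
  let s := PySem.Int.bxor s (PySem.Int.mod (PySem.Int.floordiv s 32) (s ^ 24))
  PySem.Int.bxor s (PySem.Int.mod (s * 2048) (2 ^ 24))

-- Source B's while loop: fuel = number of remaining iterations (n - i); seq[..] is in range
-- whenever the some-branch fires, so pyGet?.getD is exact there
def pvLoop (n : Int) (seen : PySem.Dict Int Int) (seq : List Int) (s : Int) (i : Int) :
    Nat → Int
  | 0 => s
  | fuel + 1 =>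
    match seen.get? s with
    | some j => (PySem.List.pyGet? seq (j + PySem.Int.mod (n - j) (i - j))).getD 0
    | none => pvLoop n (seen.insert s i) (seq ++ [s]) (pvStep s) (i + 1) fuel

def next_sn_n_alt (s : Int) (n : Int) : Int :=
  pvLoop n PySem.Dict.empty [] s 0 n.toNat

-- ===== PRECONDITION & SPEC =====
-- Pre_ excludes exactly s = 0 with n ≥ 1, the only inputs on which A raises
-- (ZeroDivisionError: the modulus s**24 is zero there, and state 0 is unreachable
-- from any nonzero state); B raises the same error there.
def Pre_next_sn_n (s : Int) (n : Int) : Prop := s ≠ 0 ∨ n ≤ 0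
instance (s : Int) (n : Int) : Decidable (Pre_next_sn_n s n) := by
  unfold Pre_next_sn_n; infer_instance

def pvWitness_next_sn_n : Int × Int := (123, 10)

def Spec_next_sn_n (s : Int) (n : Int) (out : Int) : Prop := out = next_sn_n_alt s n
instance (s : Int) (n : Int) (out : Int) : Decidable (Spec_next_sn_n s n out) := by
  unfold Spec_next_sn_n; infer_instance

-- ===== CLAIM (what is proved, stated in full; the proofs are below) =====
def Claim_equal_next_sn_n : Prop :=
  ∀ (s : Int) (n : Int), Dom_next_sn_n s n → Pre_next_sn_n s n →
    Spec_next_sn_n s n (next_sn_n s n)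

-- ===== LEMMAS AND PROOFS =====

-- A's loop body ignores the range element, so the fold is plain iteration of pvStep
theorem foldl_const_iterate (f : Int → Int) (l : List Int) (s : Int) :
    l.foldl (fun s _ => f s) s = f^[l.length] s := by
  induction l generalizing s with
  | nil => rfl
  | cons a l ih => simp [List.foldl, ih, Function.iterate_succ_apply]

theorem next_sn_n_eq_iterate (s n : Int) :
    next_sn_n s n = pvStep^[n.toNat] s := by
  have h := foldl_const_iterate pvStep (PySem.List.pyRange 0 n) s
  have hl : (PySem.List.pyRange 0 n).length = n.toNat := by
    simp [PySem.List.length_pyRange_one]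
  rw [hl] at h
  exact h

-- periodicity: one observed repeat propagates forward
theorem iterate_repeat (f : Int → Int) (x : Int) (a p : Nat)
    (h : f^[a + p] x = f^[a] x) :
    ∀ k r, f^[a + k * p + r] x = f^[a + r] x := by
  intro k
  induction k with
  | zero => simp
  | succ k ih =>
    intro r
    have h1 : a + (k + 1) * p + r = (k * p + r) + (a + p) := by ring
    have h2 : (k * p + r) + a = a + k * p + r := by ring
    calc f^[a + (k + 1) * p + r] x = f^[k * p + r] (f^[a + p] x) := by
          rw [h1, Function.iterate_add_apply]
      _ = f^[k * p + r] (f^[a] x) := by rw [h]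
      _ = f^[a + r] x := by rw [← Function.iterate_add_apply, h2, ih r]

-- the loop invariant: seq lists the first i iterates, s is the i-th, seen maps only iterates
theorem pvLoop_correct (n : Int) (s0 : Int) :
    ∀ (fuel : Nat) (seen : PySem.Dict Int Int) (seq : List Int) (s : Int) (i : Int),
      0 ≤ i → i.toNat + fuel = n.toNat →
      seq = (List.range i.toNat).map (fun k => pvStep^[k] s0) →
      s = pvStep^[i.toNat] s0 →
      (∀ x j, seen.get? x = some j → 0 ≤ j ∧ j < i ∧ pvStep^[j.toNat] s0 = x) →
      pvLoop n seen seq s i fuel = pvStep^[n.toNat] s0 := by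
  intro fuel
  induction fuel with
  | zero =>
    intro seen seq s i hi hfuel hseq hs hseen
    have : i.toNat = n.toNat := by omega
    simp [pvLoop, hs, this]
  | succ fuel ih =>
    intro seen seq s i hi hfuel hseq hs hseen
    rw [pvLoop]
    cases hget : seen.get? s with
    | none =>
      apply ih (seen.insert s i) (seq ++ [s]) (pvStep s) (i + 1) (by omega) (by omega)
      · rw [hseq, hs]
        have : (i + 1).toNat = i.toNat + 1 := by omega
        rw [this, List.range_succ]
        simp
      · have : (i + 1).toNat = i.toNat + 1 := by omega
        rw [this, hs]
        exact (Function.iterate_succ_apply' pvStep _ s0).symm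
      · intro x j hj
        by_cases hx : x = s
        · subst hx
          rw [PySem.Dict.get?_insert_self] at hj
          cases hj
          exact ⟨hi, by omega, hs.symm⟩
        · rw [PySem.Dict.get?_insert_of_ne _ _ hx] at hj
          obtain ⟨h1, h2, h3⟩ := hseen x j hj
          exact ⟨h1, by omega, h3⟩
    | some j =>
      obtain ⟨hj0, hji, hjs⟩ := hseen s j hget
      set a := j.toNat with ha
      set b := i.toNat with hb
      have hja : j = (a : Int) := by omega
      have hib : i = (b : Int) := by omega
      have hab : a < b := by omega
      have hn1 : b < n.toNat := by omega
      have hn0 : 0 < n := by omega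
      have hN : n = (n.toNat : Int) := by omega
      set p := b - a with hp
      have hpp : 0 < p := by omega
      have hrep : pvStep^[a + p] s0 = pvStep^[a] s0 := by
        have : a + p = b := by omega
        rw [this, ← hs]
        exact hjs.symm
      have hmodpos : (0 : Int) < i - j := by omega
      have hmod : PySem.Int.mod (n - j) (i - j) = (((n.toNat - a) % p : Nat) : Int) := by
        rw [PySem.Int.mod_eq_emod_of_pos hmodpos, hja, hib, hN]
        have h1 : ((n.toNat : Int)) - (a : Int) = ((n.toNat - a : Nat) : Int) := by omega
        have h2 : ((b : Int)) - (a : Int) = ((p : Nat) : Int) := by omega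
        rw [h1, h2]
        norm_cast
      set r := (n.toNat - a) % p with hr
      have hrp : r < p := Nat.mod_lt _ hpp
      have hidx : j + PySem.Int.mod (n - j) (i - j) = ((a + r : Nat) : Int) := by
        rw [hmod, hja]; push_cast; ring
      have hlen : seq.length = b := by rw [hseq]; simp
      have hinrange : a + r < seq.length := by omega
      have hgetelem : seq[(a + r : Nat)]? = some (pvStep^[a + r] s0) := by
        rw [hseq]
        rw [List.getElem?_map]
        have : (List.range b)[(a + r : Nat)]? = some (a + r) := by
          rw [List.getElem?_range (by omega)]
        rw [this]
        rfl
      change (PySem.List.pyGet? seq (j + PySem.Int.mod (n - j) (i - j))).getD 0 = pvStep^[n.toNat] s0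
      rw [hidx, PySem.List.pyGet?_natCast, hgetelem]
      have hdecomp : n.toNat = a + ((n.toNat - a) / p) * p + r := by
        have hd := Nat.div_add_mod (n.toNat - a) p
        have hc : p * ((n.toNat - a) / p) = ((n.toNat - a) / p) * p := Nat.mul_comm _ _
        omega
      have := iterate_repeat pvStep s0 a p hrep ((n.toNat - a) / p) r
      rw [hdecomp, this]
      rfl

theorem next_sn_n_alt_eq_iterate (s n : Int) :
    next_sn_n_alt s n = pvStep^[n.toNat] s := by
  apply pvLoop_correct n s n.toNat PySem.Dict.empty [] s 0 le_rfl (by simp)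
  · simp
  · rfl
  · intro x j hj
    rw [PySem.Dict.get?_empty] at hj
    cases hj

-- ===== VERDICT (by name: the statement is the Claim_ definition above) =====
theorem next_sn_n_spec : Claim_equal_next_sn_n := by
  intro s n _ _
  unfold Spec_next_sn_n
  rw [next_sn_n_eq_iterate, next_sn_n_alt_eq_iterate]
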